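-- pv_equiv track=rewrite | github.com/Tianyi-Fu/Compositional | src/utils.py | extract_features_from_objects
-- ===== SOURCE A (Python) =====
-- from typing import List, Dict, Any, Set, Tuple
--
-- def extract_features_from_objects(
--     objects: List[Dict[str, Any]]
-- ) -> Tuple[List[Set[str]], Set[str]]:
--     """
--     Extract feature sets from objects.
--
--     Args:
--         objects: List of object dictionaries with 'features' field
--
--     Returns:
--         Tuple of (list of feature sets, set of all unique features)
--     """
--     feature_sets = []
--     all_features = set()
--
--     for obj in objects:
--         feats = set(obj.get('features', []))
--         feature_sets.append(feats)
--         all_features.update(feats)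
--
--     return feature_sets, all_features
-- ===== SOURCE B (Python) =====
-- def extract_features_from_objects(objects):
--     # Divide and conquer: split the object list in half, solve each half
--     # recursively, then combine (concatenate set lists, union the half-unions).
--     n = len(objects)
--     if n == 0:
--         return [], set()
--     if n == 1:
--         feats = set(objects[0].get('features', []))
--         return [feats], set(feats)
--     mid = n // 2
--     left_sets, left_all = extract_features_from_objects(objects[:mid])
--     right_sets, right_all = extract_features_from_objects(objects[mid:])
--     return left_sets + right_sets, left_all | right_all
-- ===== Notes on version B (the rewrite author's own statement) =====
-- stated objective: alternative
-- what changed: A's single fused linear loop is replaced by a divide-and-conquer recursion: split the object list in half, recurse on each half, then concatenate the per-half set lists and union the two half-unions (correct since set union is associative).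
import Mathlib
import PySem

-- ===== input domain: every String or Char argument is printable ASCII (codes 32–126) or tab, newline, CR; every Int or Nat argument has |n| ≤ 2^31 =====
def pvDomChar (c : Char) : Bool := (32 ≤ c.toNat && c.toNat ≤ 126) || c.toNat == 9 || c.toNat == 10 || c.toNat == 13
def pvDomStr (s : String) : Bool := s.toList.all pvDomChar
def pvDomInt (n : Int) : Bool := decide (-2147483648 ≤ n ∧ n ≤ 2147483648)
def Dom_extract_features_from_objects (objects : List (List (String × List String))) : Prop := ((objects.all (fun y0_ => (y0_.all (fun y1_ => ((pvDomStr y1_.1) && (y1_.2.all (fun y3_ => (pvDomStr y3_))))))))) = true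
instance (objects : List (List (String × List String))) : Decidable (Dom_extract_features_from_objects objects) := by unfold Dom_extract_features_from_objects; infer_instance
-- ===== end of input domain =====

-- B replaces A's single fused linear loop by a divide-and-conquer recursion (split, recurse, concatenate + union); objective: alternative, same observable result.
-- ===== PORT A =====
-- A: one fused loop accumulating (feature_sets, all_features) together.
def extract_features_from_objects (objects : List (List (String × List String))) : List (List String) × List String :=
  objects.foldl
    (fun st obj =>
      let feats : PySem.Set String := PySem.Set.ofList ((obj.lookup "features").getD [])
      (st.1 ++ [feats], PySem.Set.update st.2 feats))
    ([], PySem.Set.empty)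

-- ===== PORT B =====
-- B: divide and conquer — split the list in half, recurse, concatenate the set lists and union the half-unions.
def extract_features_from_objects_alt (objects : List (List (String × List String))) : List (List String) × List String :=
  match objects with
  | [] => ([], PySem.Set.empty)
  | [obj] =>
      let feats : PySem.Set String := PySem.Set.ofList ((obj.lookup "features").getD [])
      ([feats], PySem.Set.ofList feats)
  | o1 :: o2 :: rest =>
      let l := o1 :: o2 :: rest
      let mid := l.length / 2
      let left := extract_features_from_objects_alt (l.take mid)
      let right := extract_features_from_objects_alt (l.drop mid)
      (left.1 ++ right.1, PySem.Set.union left.2 right.2)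
termination_by objects.length
decreasing_by
  · simp [List.length_take]; omega
  · simp [List.length_drop]; omega

-- ===== PRECONDITION & SPEC =====
def Spec_extract_features_from_objects (objects : List (List (String × List String))) (out : List (List String) × List String) : Prop := out = extract_features_from_objects_alt objects
instance (objects : List (List (String × List String))) (out : List (List String) × List String) : Decidable (Spec_extract_features_from_objects objects out) := by unfold Spec_extract_features_from_objects; infer_instance

-- ===== CLAIM =====
def Claim_equal_extract_features_from_objects : Prop := ∀ (objects : List (List (String × List String))), Dom_extract_features_from_objects objects → Spec_extract_features_from_objects objects (extract_features_from_objects objects)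

-- ===== LEMMAS AND PROOFS =====
-- the per-object accessors
def pvFeats (obj : List (String × List String)) : List String := (obj.lookup "features").getD []

-- update by a deduplicated list equals update by the raw list
theorem pv_update_ofList (s : PySem.Set String) (l : List String) :
    PySem.Set.update s (PySem.Set.ofList l) = PySem.Set.update s l := by
  induction l using List.reverseRecOn generalizing s with
  | nil => simp
  | append_singleton l x ih =>
      have hsingle : ∀ t : PySem.Set String, PySem.Set.update t [x] = PySem.Set.add t x := fun t => rfl
      by_cases hx : x ∈ l
      · rw [PySem.Set.ofList_append_singleton,
          PySem.Set.add_of_mem (by simpa [PySem.Set.mem_ofList] using hx), ih,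
          PySem.Set.update_append, hsingle,
          PySem.Set.add_of_mem (by simp [PySem.Set.mem_update, hx])]
      · rw [PySem.Set.ofList_append_singleton,
          PySem.Set.add_of_not_mem (by simpa [PySem.Set.mem_ofList] using hx),
          PySem.Set.update_append, ih, PySem.Set.update_append]

-- union of set-of(xs) and set-of(ys) is set-of(xs ++ ys)
theorem pv_union_ofList (xs ys : List String) :
    PySem.Set.union (PySem.Set.ofList xs) (PySem.Set.ofList ys) = PySem.Set.ofList (xs ++ ys) := by
  show PySem.Set.update (PySem.Set.ofList xs) (PySem.Set.ofList ys) = _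
  rw [pv_update_ofList, PySem.Set.ofList_append]

-- A's fused loop in closed form (generalized over the accumulators)
theorem pv_A_fuse (l : List (List (String × List String))) (fs : List (List String)) (acc : PySem.Set String) :
    l.foldl
      (fun st obj =>
        let feats : PySem.Set String := PySem.Set.ofList ((obj.lookup "features").getD [])
        (st.1 ++ [feats], PySem.Set.update st.2 feats))
      (fs, acc)
    = (fs ++ l.map (fun o => PySem.Set.ofList (pvFeats o)),
       PySem.Set.update acc (l.flatMap pvFeats)) := by
  induction l generalizing fs acc with
  | nil => simp
  | cons o rest ih =>
      simp only [List.foldl_cons, List.map_cons, List.flatMap_cons]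
      rw [ih, PySem.Set.update_append, pv_update_ofList]
      simp [pvFeats]

-- closed form of A
theorem pv_A_closed (objects : List (List (String × List String))) :
    extract_features_from_objects objects
      = (objects.map (fun o => PySem.Set.ofList (pvFeats o)),
         PySem.Set.ofList (objects.flatMap pvFeats)) := by
  unfold extract_features_from_objects
  rw [pv_A_fuse]
  simp [PySem.Set.update_nil_left, PySem.Set.empty]

-- closed form of B (strong induction on the length, following the halving recursion)
theorem pv_B_aux : ∀ (n : Nat) (objects : List (List (String × List String))), objects.length ≤ n →
    extract_features_from_objects_alt objects
      = (objects.map (fun o => PySem.Set.ofList (pvFeats o)),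
         PySem.Set.ofList (objects.flatMap pvFeats)) := by
  intro n
  induction n with
  | zero =>
      intro objects h
      have : objects = [] := List.eq_nil_of_length_eq_zero (Nat.le_zero.mp h)
      subst this
      rw [extract_features_from_objects_alt]; rfl
  | succ n ih =>
      intro objects h
      match objects with
      | [] => rw [extract_features_from_objects_alt]; rfl
      | [obj] =>
          simp [extract_features_from_objects_alt, pvFeats, PySem.Set.ofList_ofList]
      | o1 :: o2 :: rest =>
          rw [extract_features_from_objects_alt]
          have hlen : (o1 :: o2 :: rest).length = rest.length + 2 := by simp
          have hmid : (o1 :: o2 :: rest).length / 2 ≤ rest.length + 1 := by omega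
          have h1 : ((o1 :: o2 :: rest).take ((o1 :: o2 :: rest).length / 2)).length ≤ n := by
            simp only [List.length_take]
            have : rest.length + 2 ≤ n + 1 := h
            omega
          have h2 : ((o1 :: o2 :: rest).drop ((o1 :: o2 :: rest).length / 2)).length ≤ n := by
            simp only [List.length_drop]
            have : rest.length + 2 ≤ n + 1 := h
            have : 1 ≤ (o1 :: o2 :: rest).length / 2 := by simp; omega
            omega
          rw [ih _ h1, ih _ h2]
          simp only [pv_union_ofList, ← List.map_append, ← List.flatMap_append,
            List.take_append_drop]

-- closed form of B
theorem pv_B_closed (objects : List (List (String × List String))) :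
    extract_features_from_objects_alt objects
      = (objects.map (fun o => PySem.Set.ofList (pvFeats o)),
         PySem.Set.ofList (objects.flatMap pvFeats)) :=
  pv_B_aux objects.length objects le_rfl

-- ===== VERDICT =====
theorem extract_features_from_objects_spec : Claim_equal_extract_features_from_objects := by
  intro objects _
  show extract_features_from_objects objects = extract_features_from_objects_alt objects
  rw [pv_A_closed, pv_B_closed]
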